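-- pv_equiv track=rewrite | github.com/tdijkmans/dot_connect | convert_path.py | find_near_optimal_route
-- ===== SOURCE A (Python) =====
-- def find_near_optimal_route(graph):
--     """Find a near-optimal route that visits each edge at least once"""
--     # Use a heuristic to find a near-optimal route
--     visited_edges = set()
--     route = []
--
--     def dfs(node):
--         for neighbor, _ in graph[node]:
--             edge = frozenset([node, neighbor])
--             if edge not in visited_edges:
--                 visited_edges.add(edge)
--                 dfs(neighbor)
--         route.append(node)
--
--     start_node = next(iter(graph))
--     dfs(start_node)
--     return route[::-1]
-- ===== SOURCE B (Python) =====
-- def find_near_optimal_route(graph):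
--     """Find a near-optimal route that visits each edge at least once"""
--     # Iterative DFS with an explicit stack of (node, remaining-neighbors) frames
--     visited_edges = set()
--     route = []
--     start_node = next(iter(graph))
--     stack = [(start_node, list(graph[start_node]))]
--     while stack:
--         node, rest = stack[-1]
--         if not rest:
--             stack.pop()
--             route.append(node)
--             continue
--         neighbor = rest[0][0]
--         stack[-1] = (node, rest[1:])
--         edge = frozenset([node, neighbor])
--         if edge not in visited_edges:
--             visited_edges.add(edge)
--             stack.append((neighbor, list(graph[neighbor])))
--     return route[::-1]
-- ===== Notes on version B (the rewrite author's own statement) =====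
-- stated objective: alternative
-- what changed: The recursive DFS (nested def dfs with Python call-stack recursion) is replaced by an iterative DFS over an explicit stack of (node, remaining-neighbors) frames that marks each edge at push time; same edge-visiting order and postorder route.
import Mathlib
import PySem

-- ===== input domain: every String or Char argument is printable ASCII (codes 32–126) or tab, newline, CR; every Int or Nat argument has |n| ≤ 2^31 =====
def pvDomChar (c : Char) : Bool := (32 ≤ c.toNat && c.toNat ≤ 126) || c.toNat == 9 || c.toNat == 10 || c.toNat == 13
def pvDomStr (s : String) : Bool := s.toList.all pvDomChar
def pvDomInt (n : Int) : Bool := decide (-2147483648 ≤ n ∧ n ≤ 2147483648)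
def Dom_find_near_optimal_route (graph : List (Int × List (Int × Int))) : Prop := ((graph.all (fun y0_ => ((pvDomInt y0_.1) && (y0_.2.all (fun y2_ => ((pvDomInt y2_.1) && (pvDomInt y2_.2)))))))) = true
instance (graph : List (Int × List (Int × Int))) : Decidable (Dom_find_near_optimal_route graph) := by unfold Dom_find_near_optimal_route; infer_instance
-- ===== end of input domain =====

-- B replaces A's recursive DFS by an iterative DFS over an explicit stack of
-- (node, remaining-neighbors) frames (objective: alternative decomposition, same cost).

-- ===== PORT A =====
-- frozenset([node, neighbor]) is ported as the canonically ordered pair (min, max):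
-- exact for equality/membership of one- or two-element frozensets of ints.
def canonEdge (a b : Int) : Int × Int := if a ≤ b then (a, b) else (b, a)

-- all edges the graph mentions (used only to size the recursion fuel)
def edgePool (g : List (Int × List (Int × Int))) : List (Int × Int) :=
  g.flatMap (fun p => p.2.map (fun q => canonEdge p.1 q.1))

-- A's dfs: fuel counts call depth; Python's depth is ≤ distinct edges + 1, so the
-- fuel (edgePool g).length + 1 supplied below never runs out (proved in the lemmas).
-- graph[node] is ported as dict getD with default []: Python raises KeyError on a
-- missing neighbor, which Pre_ excludes.
mutual
def dfsA (g : List (Int × List (Int × Int))) : Nat → Int → List (Int × Int) × List Int → List (Int × Int) × List Int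
  | 0, _, st => st
  | f+1, node, st =>
    let st' := loopA g f node ((PySem.Dict.mk g).getD node []) st
    (st'.1, st'.2 ++ [node])
  termination_by f _ _ => (f, 0)
def loopA (g : List (Int × List (Int × Int))) : Nat → Int → List (Int × Int) → List (Int × Int) × List Int → List (Int × Int) × List Int
  | _, _, [], st => st
  | f, node, q :: rest, (vis, rt) =>
    if canonEdge node q.1 ∈ vis then loopA g f node rest (vis, rt)
    else loopA g f node rest (dfsA g f q.1 (canonEdge node q.1 :: vis, rt))
  termination_by f _ adj _ => (f, adj.length + 1)
end

def find_near_optimal_route (graph : List (Int × List (Int × Int))) : List Int :=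
  match graph with
  | [] => []  -- next(iter(graph)) raises StopIteration: excluded by Pre_
  | (k, _) :: _ =>
    -- route[::-1] is List.reverse (exact)
    ((dfsA graph ((edgePool graph).length + 1) k ([], [])).2).reverse

-- ===== PORT B =====
-- the while loop: each frame is (node, remaining adjacency list); fuel is consumed
-- only when a frame is pushed (one push per newly visited edge, so the fuel
-- (edgePool g).length + 1 supplied below never runs out; proved in the lemmas).
def runB (g : List (Int × List (Int × Int))) : Nat → List (Int × List (Int × Int)) → List (Int × Int) → List Int → List Int
  | _, [], _, rt => rt
  | f, (node, []) :: stack, _vis, rt => runB g f stack _vis (rt ++ [node])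
  | f, (node, q :: rest) :: stack, vis, rt =>
    if canonEdge node q.1 ∈ vis then
      runB g f ((node, rest) :: stack) vis rt
    else
      match f with
      | 0 => rt  -- fuel exhausted: unreachable with the fuel supplied below
      | f'+1 => runB g f' ((q.1, (PySem.Dict.mk g).getD q.1 []) :: (node, rest) :: stack) (canonEdge node q.1 :: vis) rt
termination_by f stack _ _ => (f, (stack.map (fun fr => fr.2.length + 1)).sum)

def find_near_optimal_route_alt (graph : List (Int × List (Int × Int))) : List Int :=
  match graph with
  | [] => []  -- next(iter(graph)) raises StopIteration: excluded by Pre_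
  | (k, _) :: _ =>
    (runB graph ((edgePool graph).length + 1) [(k, (PySem.Dict.mk graph).getD k [])] [] []).reverse

-- ===== PRECONDITION & SPEC =====
-- the key-nodes reachable from the first key along adjacency entries (closure
-- iteration; used only by Pre_, not by either port)
def reachStep (g : List (Int × List (Int × Int))) (S : List Int) : List Int :=
  (S ++ (S.flatMap (fun u => ((PySem.Dict.mk g).getD u []).map Prod.fst)).filter
      (fun v => decide (v ∈ g.map Prod.fst))).dedup
def reachSet (g : List (Int × List (Int × Int))) : List Int :=
  match g with
  | [] => []
  | (k, _) :: _ => (reachStep g)^[g.length] [k]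
-- Pre_ excludes exactly the inputs on which A raises: the empty dict (StopIteration
-- from next(iter(graph))) and graphs in which some node reachable from the first key
-- has a neighbor that is not a key of the dict (KeyError when the dfs reaches it).
def Pre_find_near_optimal_route (graph : List (Int × List (Int × Int))) : Prop :=
  graph ≠ [] ∧ ∀ u ∈ reachSet graph, ∀ q ∈ (PySem.Dict.mk graph).getD u [], q.1 ∈ graph.map Prod.fst
instance (graph : List (Int × List (Int × Int))) : Decidable (Pre_find_near_optimal_route graph) := by unfold Pre_find_near_optimal_route; infer_instance

def pvWitness_find_near_optimal_route : (List (Int × List (Int × Int))) :=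
  [(0, [(1, 7), (2, 1)]), (1, [(0, 7)]), (2, [(0, 1), (1, 3)])]

def Spec_find_near_optimal_route (graph : List (Int × List (Int × Int))) (out : List Int) : Prop := out = find_near_optimal_route_alt graph
instance (graph : List (Int × List (Int × Int))) (out : List Int) : Decidable (Spec_find_near_optimal_route graph out) := by unfold Spec_find_near_optimal_route; infer_instance

-- ===== CLAIM (what is proved, stated in full; the proofs are below) =====
def Claim_equal_find_near_optimal_route : Prop := ∀ (graph : List (Int × List (Int × Int))), Dom_find_near_optimal_route graph → Pre_find_near_optimal_route graph → Spec_find_near_optimal_route graph (find_near_optimal_route graph)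

-- ===== LEMMAS AND PROOFS =====

-- the number of edge occurrences not yet visited: the common fuel measure
def mRem (g : List (Int × List (Int × Int))) (vis : List (Int × Int)) : Nat :=
  ((edgePool g).filter (fun e => decide (e ∉ vis))).length

-- every frame (n, adj) on B's stack only mentions edges of the graph
def AdjOk (g : List (Int × List (Int × Int))) (node : Int) (adj : List (Int × Int)) : Prop :=
  ∀ q ∈ adj, canonEdge node q.1 ∈ edgePool g

def StkOk (g : List (Int × List (Int × Int))) (stack : List (Int × List (Int × Int))) : Prop :=
  ∀ fr ∈ stack, AdjOk g fr.1 fr.2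

lemma adjOk_getD (g : List (Int × List (Int × Int))) (node : Int) :
    AdjOk g node ((PySem.Dict.mk g).getD node []) := by
  induction g with
  | nil => intro q hq; simp [PySem.Dict.getD, PySem.Dict.get?] at hq
  | cons p g ih =>
    intro q hq
    rw [PySem.Dict.getD_eq_get?_getD] at hq
    rcases p with ⟨k, v⟩
    rw [PySem.Dict.get?_mk_cons] at hq
    simp only [edgePool, List.flatMap_cons, List.mem_append]
    by_cases h : (k == node)
    · have hk := eq_of_beq h; subst hk
      simp at hq
      exact Or.inl (List.mem_map_of_mem hq)
    · simp [h] at hq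
      rw [← PySem.Dict.getD_eq_get?_getD] at hq
      exact Or.inr (ih q hq)

lemma filt_le (l : List (Int × Int)) (vis vis' : List (Int × Int))
    (h : ∀ x, x ∈ vis → x ∈ vis') :
    (l.filter (fun x => decide (x ∉ vis'))).length ≤ (l.filter (fun x => decide (x ∉ vis))).length := by
  apply List.Sublist.length_le
  apply List.monotone_filter_right
  intro x hx
  simp at hx ⊢
  exact fun hc => hx (h x hc)

lemma filt_lt (l : List (Int × Int)) (e : Int × Int) (vis : List (Int × Int))
    (he : e ∈ l) (hnv : e ∉ vis) :
    (l.filter (fun x => decide (x ∉ e :: vis))).length < (l.filter (fun x => decide (x ∉ vis))).length := by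
  induction l with
  | nil => simp at he
  | cons a l ih =>
    simp only [List.filter_cons]
    rcases List.mem_cons.1 he with rfl | hal
    · have h1 : (decide (e ∉ e :: vis)) = false := by simp
      have h2 : (decide (e ∉ vis)) = true := by simpa using hnv
      simp only [h1, h2, Bool.false_eq_true, if_false, if_true, List.length_cons]
      have := filt_le l vis (e :: vis) (fun x hx => List.mem_cons_of_mem _ hx)
      omega
    · have hle := filt_le l vis (e :: vis) (fun x hx => List.mem_cons_of_mem _ hx)
      have hlt := ih hal
      by_cases ha : a ∈ e :: vis
      · have h1 : (decide (a ∉ e :: vis)) = false := by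
          simp only [decide_eq_false_iff_not, not_not]; exact ha
        rcases List.mem_cons.1 ha with rfl | hav
        · have h2 : (decide (a ∉ vis)) = true := by simpa using hnv
          simp only [h1, h2, Bool.false_eq_true, if_false, if_true, List.length_cons]
          omega
        · have h2 : (decide (a ∉ vis)) = false := by
            simp only [decide_eq_false_iff_not, not_not]; exact hav
          simp only [h1, h2, Bool.false_eq_true, if_false]
          exact hlt
      · have h1 : (decide (a ∉ e :: vis)) = true := by simpa using ha
        have h2 : (decide (a ∉ vis)) = true := by
          simp only [decide_eq_true_eq]
          exact fun hc => ha (List.mem_cons_of_mem _ hc)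
        simp only [h1, h2, if_true, List.length_cons]
        omega

lemma mRem_mono (g : List (Int × List (Int × Int))) {vis vis' : List (Int × Int)}
    (h : ∀ e, e ∈ vis → e ∈ vis') : mRem g vis' ≤ mRem g vis :=
  filt_le _ vis vis' h

lemma mRem_cons_lt (g : List (Int × List (Int × Int))) {e : Int × Int} {vis : List (Int × Int)}
    (he : e ∈ edgePool g) (hnv : e ∉ vis) : mRem g (e :: vis) < mRem g vis :=
  filt_lt _ e vis he hnv

lemma runB_nil (g : List (Int × List (Int × Int))) (f : Nat) (vis : List (Int × Int)) (rt : List Int) :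
    runB g f [] vis rt = rt := by rw [runB]

lemma runB_pop (g : List (Int × List (Int × Int))) (f : Nat) (node : Int)
    (stack : List (Int × List (Int × Int))) (vis : List (Int × Int)) (rt : List Int) :
    runB g f ((node, []) :: stack) vis rt = runB g f stack vis (rt ++ [node]) := by rw [runB]

-- the full simulation invariant, at dfs-call granularity
def DfsConcl (g : List (Int × List (Int × Int))) (f : Nat) (node : Int)
    (vis : List (Int × Int)) (rt : List Int) : Prop :=
  vis <:+ (dfsA g f node (vis, rt)).1 ∧
  mRem g (dfsA g f node (vis, rt)).1 + ((dfsA g f node (vis, rt)).1.length - vis.length) ≤ mRem g vis ∧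
  ∀ fB stack, mRem g vis ≤ fB → StkOk g stack →
    runB g fB ((node, (PySem.Dict.mk g).getD node []) :: stack) vis rt
      = runB g (fB - ((dfsA g f node (vis, rt)).1.length - vis.length)) stack
          (dfsA g f node (vis, rt)).1 (dfsA g f node (vis, rt)).2

lemma dfs_sim (g : List (Int × List (Int × Int))) :
    ∀ f node vis rt, mRem g vis < f → DfsConcl g f node vis rt := by
  intro f
  induction f with
  | zero => intro node vis rt h; exact absurd h (by omega)
  | succ f ih =>
    -- the same invariant at loop granularity, fuel f
    have loop : ∀ (adj : List (Int × Int)) (node : Int) (vis : List (Int × Int)) (rt : List Int),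
        mRem g vis ≤ f → AdjOk g node adj →
        vis <:+ (loopA g f node adj (vis, rt)).1 ∧
        mRem g (loopA g f node adj (vis, rt)).1 + ((loopA g f node adj (vis, rt)).1.length - vis.length) ≤ mRem g vis ∧
        ∀ fB stack, mRem g vis ≤ fB → StkOk g stack →
          runB g fB ((node, adj) :: stack) vis rt
            = runB g (fB - ((loopA g f node adj (vis, rt)).1.length - vis.length)) ((node, []) :: stack)
                (loopA g f node adj (vis, rt)).1 (loopA g f node adj (vis, rt)).2 := by
      intro adj
      induction adj with
      | nil =>
        intro node vis rt hf hok
        simp only [loopA]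
        exact ⟨List.suffix_refl _, by omega, fun fB stack hfB hstk => by simp⟩
      | cons q rest ihr =>
        intro node vis rt hf hok
        have hq : canonEdge node q.1 ∈ edgePool g := hok q List.mem_cons_self
        have hokr : AdjOk g node rest := fun x hx => hok x (List.mem_cons_of_mem _ hx)
        by_cases hmem : canonEdge node q.1 ∈ vis
        · have hA : loopA g f node (q :: rest) (vis, rt) = loopA g f node rest (vis, rt) := by
            rw [loopA]; simp [hmem]
          rw [hA]
          obtain ⟨h1, h2, h3⟩ := ihr node vis rt hf hokr
          refine ⟨h1, h2, ?_⟩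
          intro fB stack hfB hstk
          have hB : runB g fB ((node, q :: rest) :: stack) vis rt
              = runB g fB ((node, rest) :: stack) vis rt := by
            conv_lhs => rw [runB.eq_def]
            simp [hmem]
          rw [hB]; exact h3 fB stack hfB hstk
        · have hmlt : mRem g (canonEdge node q.1 :: vis) < mRem g vis := mRem_cons_lt g hq hmem
          have hA : loopA g f node (q :: rest) (vis, rt)
              = loopA g f node rest (dfsA g f q.1 (canonEdge node q.1 :: vis, rt)) := by
            rw [loopA]; simp [hmem]
          rw [hA]
          obtain ⟨hd1, hd2, hd3⟩ := ih q.1 (canonEdge node q.1 :: vis) rt (by omega)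
          have hmD : mRem g (dfsA g f q.1 (canonEdge node q.1 :: vis, rt)).1 ≤ mRem g (canonEdge node q.1 :: vis) :=
            mRem_mono g (fun x hx => hd1.subset hx)
          obtain ⟨hl1, hl2, hl3⟩ := ihr node (dfsA g f q.1 (canonEdge node q.1 :: vis, rt)).1
            (dfsA g f q.1 (canonEdge node q.1 :: vis, rt)).2 (by omega) hokr
          simp only [Prod.mk.eta] at hl1 hl2 hl3
          have hsuf0 : vis <:+ canonEdge node q.1 :: vis := List.suffix_cons _ _
          have hlen0 : (canonEdge node q.1 :: vis).length = vis.length + 1 := rfl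
          have hlen1 : (canonEdge node q.1 :: vis).length ≤ (dfsA g f q.1 (canonEdge node q.1 :: vis, rt)).1.length :=
            hd1.length_le
          have hlen2 : (dfsA g f q.1 (canonEdge node q.1 :: vis, rt)).1.length ≤
              (loopA g f node rest (dfsA g f q.1 (canonEdge node q.1 :: vis, rt))).1.length :=
            hl1.length_le
          refine ⟨(hsuf0.trans hd1).trans hl1, by omega, ?_⟩
          intro fB stack hfB hstk
          obtain ⟨fB', rfl⟩ : ∃ fB', fB = fB' + 1 := ⟨fB - 1, by omega⟩
          have hstep1 : runB g (fB' + 1) ((node, q :: rest) :: stack) vis rt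
              = runB g fB' ((q.1, (PySem.Dict.mk g).getD q.1 []) :: (node, rest) :: stack)
                  (canonEdge node q.1 :: vis) rt := by
            conv_lhs => rw [runB.eq_def]
            simp [hmem]
          have hstk2 : StkOk g ((node, rest) :: stack) := by
            intro fr hfr
            rcases List.mem_cons.1 hfr with rfl | h
            · exact hokr
            · exact hstk fr h
          have hstep2 := hd3 fB' ((node, rest) :: stack) (by omega) hstk2
          have hstep3 := hl3 (fB' - ((dfsA g f q.1 (canonEdge node q.1 :: vis, rt)).1.length - (canonEdge node q.1 :: vis).length))
            stack (by omega) hstk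
          have hfuel : (fB' + 1) - ((loopA g f node rest (dfsA g f q.1 (canonEdge node q.1 :: vis, rt))).1.length - vis.length)
              = (fB' - ((dfsA g f q.1 (canonEdge node q.1 :: vis, rt)).1.length - (canonEdge node q.1 :: vis).length))
                - ((loopA g f node rest (dfsA g f q.1 (canonEdge node q.1 :: vis, rt))).1.length
                    - (dfsA g f q.1 (canonEdge node q.1 :: vis, rt)).1.length) := by
            omega
          rw [hstep1, hstep2, hstep3, hfuel]
    -- assemble the dfs-level statement at fuel f+1
    intro node vis rt hlt
    obtain ⟨h1, h2, h3⟩ := loop ((PySem.Dict.mk g).getD node []) node vis rt (by omega) (adjOk_getD g node)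
    have hD : dfsA g (f + 1) node (vis, rt)
        = ((loopA g f node ((PySem.Dict.mk g).getD node []) (vis, rt)).1,
           (loopA g f node ((PySem.Dict.mk g).getD node []) (vis, rt)).2 ++ [node]) := by
      rw [dfsA]
    refine ⟨?_, ?_, ?_⟩
    · rw [hD]; exact h1
    · rw [hD]; exact h2
    · intro fB stack hfB hstk
      rw [hD]
      have := h3 fB stack (by omega) hstk
      rw [this, runB_pop]

-- ===== VERDICT (by name: the statement is the Claim_ definition above) =====
theorem find_near_optimal_route_spec : Claim_equal_find_near_optimal_route := by
  intro graph _hdom _hpre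
  unfold Spec_find_near_optimal_route
  cases graph with
  | nil => rfl
  | cons p rest =>
    obtain ⟨k, adj⟩ := p
    have hm0 : mRem ((k, adj) :: rest) [] ≤ (edgePool ((k, adj) :: rest)).length :=
      List.length_filter_le _ _
    obtain ⟨-, -, h3⟩ := dfs_sim ((k, adj) :: rest) ((edgePool ((k, adj) :: rest)).length + 1) k [] [] (by omega)
    have hrun := h3 ((edgePool ((k, adj) :: rest)).length + 1) [] (by omega) (fun fr hfr => by simp at hfr)
    simp only [find_near_optimal_route, find_near_optimal_route_alt]
    rw [hrun, runB_nil]
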